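-- pv_equiv track=rewrite | github.com/ummayhanijaved/vqa_gi_thesis | src/stage4_revised.py | infer_route
-- ===== SOURCE A (Python) =====
-- def infer_route(question: str) -> int:
--     """Map a question string to a route index (0–5)."""
--     q = question.lower().strip()
--     # Route 4 — Location
--     if any(k in q for k in ["where", "location", "located", "position",
--                               "region", "quadrant", "area", "part of"]):
--         return 4
--     # Route 5 — Count
--     if any(k in q for k in ["how many", "count", "number of", "how large",
--                               "how big", "size", "millimeter", " mm"]):
--         return 5
--     # Route 3 — Colour
--     if any(k in q for k in ["colour", "color", "coloured", "colored"]):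
--         return 3
--     # Route 2 — Multi-Choice
--     if any(k in q for k in ["what findings", "which findings",
--                               "what abnormalities", "what features",
--                               "what is visible", "what can be seen",
--                               "what are visible", "which instruments"]):
--         return 2
--     # Route 0 — Yes/No
--     yn_starters = ["is ", "are ", "was ", "were ", "has ", "have ",
--                     "does ", "do ", "did ", "can ", "could ", "will "]
--     if any(q.startswith(k) for k in yn_starters):
--         return 0
--     # Route 1 — Single Choice (default for "what/which" questions)
--     return 1
-- ===== SOURCE B (Python) =====
-- # Two-stage rewrite: a flat (keyword, route, prefix) index is scanned exhaustively to
-- # collect ALL matching routes, then the winner is picked in a separate priority pass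
-- # (no early-exit chain over rule groups as in the original).
-- _FLAT = (
--     [(k, 4, False) for k in ["where", "location", "located", "position",
--                              "region", "quadrant", "area", "part of"]]
--     + [(k, 5, False) for k in ["how many", "count", "number of", "how large",
--                                "how big", "size", "millimeter", " mm"]]
--     + [(k, 3, False) for k in ["colour", "color", "coloured", "colored"]]
--     + [(k, 2, False) for k in ["what findings", "which findings",
--                                "what abnormalities", "what features",
--                                "what is visible", "what can be seen",
--                                "what are visible", "which instruments"]]
--     + [(k, 0, True) for k in ["is ", "are ", "was ", "were ", "has ", "have ",
--                               "does ", "do ", "did ", "can ", "could ", "will "]]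
-- )
--
-- def infer_route(question: str) -> int:
--     q = question.lower().strip()
--     matched = [r for k, r, p in _FLAT if (q.startswith(k) if p else k in q)]
--     for r in (4, 5, 3, 2, 0):
--         if r in matched:
--             return r
--     return 1
-- ===== Notes on version B (the rewrite author's own statement) =====
-- stated objective: alternative
-- what changed: Instead of A's prioritized early-return if-chain, B exhaustively scans one flat (keyword, route, prefix) index collecting every matching route, then selects the winner in a separate priority pass over (4,5,3,2,0) with default 1.
import Mathlib
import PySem

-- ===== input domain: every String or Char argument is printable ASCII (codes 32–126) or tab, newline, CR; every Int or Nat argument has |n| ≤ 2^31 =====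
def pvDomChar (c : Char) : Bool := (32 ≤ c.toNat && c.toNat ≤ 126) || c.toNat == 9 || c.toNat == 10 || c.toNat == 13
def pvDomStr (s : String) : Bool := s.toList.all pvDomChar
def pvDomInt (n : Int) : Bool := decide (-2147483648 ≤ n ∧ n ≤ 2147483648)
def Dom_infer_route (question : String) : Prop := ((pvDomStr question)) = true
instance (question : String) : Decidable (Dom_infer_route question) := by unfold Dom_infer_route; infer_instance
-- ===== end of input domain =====

-- B replaces A's prioritized early-return if-chain by a flat keyword index scanned
-- exhaustively (collecting all matching routes) followed by a separate priority pass.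

-- ===== PORT A =====
def infer_route (question : String) : Int :=
  let q := PySem.Str.strip (PySem.Str.lower question)
  if ["where", "location", "located", "position",
      "region", "quadrant", "area", "part of"].any (fun k => PySem.Str.isIn k q) then 4
  else if ["how many", "count", "number of", "how large",
           "how big", "size", "millimeter", " mm"].any (fun k => PySem.Str.isIn k q) then 5
  else if ["colour", "color", "coloured", "colored"].any (fun k => PySem.Str.isIn k q) then 3
  else if ["what findings", "which findings",
           "what abnormalities", "what features",
           "what is visible", "what can be seen",
           "what are visible", "which instruments"].any (fun k => PySem.Str.isIn k q) then 2
  else if ["is ", "are ", "was ", "were ", "has ", "have ",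
           "does ", "do ", "did ", "can ", "could ", "will "].any
            (fun k => PySem.Str.startswith q k) then 0
  else 1

-- ===== PORT B =====
-- the flat (keyword, route, prefix-mode) index, built exactly as Source B builds _FLAT
def pvFlat : List (String × Int × Bool) :=
  (["where", "location", "located", "position",
    "region", "quadrant", "area", "part of"].map (fun k => (k, (4 : Int), false)))
  ++ (["how many", "count", "number of", "how large",
       "how big", "size", "millimeter", " mm"].map (fun k => (k, (5 : Int), false)))
  ++ (["colour", "color", "coloured", "colored"].map (fun k => (k, (3 : Int), false)))
  ++ (["what findings", "which findings",
       "what abnormalities", "what features",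
       "what is visible", "what can be seen",
       "what are visible", "which instruments"].map (fun k => (k, (2 : Int), false)))
  ++ (["is ", "are ", "was ", "were ", "has ", "have ",
       "does ", "do ", "did ", "can ", "could ", "will "].map (fun k => (k, (0 : Int), true)))

-- the comprehension's filter condition: q.startswith(k) if p else k in q
def pvMatches (q : String) (t : String × Int × Bool) : Bool :=
  if t.2.2 then PySem.Str.startswith q t.1 else PySem.Str.isIn t.1 q

-- the priority pass: for r in (4,5,3,2,0): if r in matched: return r; return 1
def pvPick (matched : List Int) : List Int → Int
  | [] => 1
  | r :: rs => if matched.contains r then r else pvPick matched rs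

def infer_route_alt (question : String) : Int :=
  let q := PySem.Str.strip (PySem.Str.lower question)
  let matched := (pvFlat.filter (pvMatches q)).map (fun t => t.2.1)
  pvPick matched [4, 5, 3, 2, 0]

-- ===== PRECONDITION & SPEC =====
def Spec_infer_route (question : String) (out : Int) : Prop := out = infer_route_alt question
instance (question : String) (out : Int) : Decidable (Spec_infer_route question out) := by unfold Spec_infer_route; infer_instance

-- ===== CLAIM (what is proved, stated in full; the proofs are below) =====
def Claim_equal_infer_route : Prop := ∀ (question : String), Dom_infer_route question → Spec_infer_route question (infer_route question)

-- ===== LEMMAS AND PROOFS =====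

-- a group's contribution to `matched` contains x iff x is that group's route and a keyword matched
theorem pv_contains_group (q : String) (ks : List String) (r x : Int) (pfx : Bool) :
    (((ks.map (fun k => (k, r, pfx))).filter (pvMatches q)).map (fun t => t.2.1)).contains x
      = (decide (x = r) && ks.any (fun k => pvMatches q (k, r, pfx))) := by
  induction ks with
  | nil => simp
  | cons k ks ih =>
    simp only [List.map_cons, List.filter_cons, List.any_cons]
    by_cases h : pvMatches q (k, r, pfx) = true
    · rw [if_pos h]
      simp only [List.map_cons, List.contains_cons, ih, h, Bool.true_or, Bool.and_true]
      by_cases hx : x = r <;> simp [hx]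
    · have hf : pvMatches q (k, r, pfx) = false := by simpa using h
      rw [if_neg h, ih, hf]
      simp

theorem pv_contains_append (xs ys : List Int) (x : Int) :
    (xs ++ ys).contains x = (xs.contains x || ys.contains x) := by
  simp [List.contains_eq_mem, List.mem_append]

-- ===== VERDICT (by name: the statement is the Claim_ definition above) =====
theorem infer_route_spec : Claim_equal_infer_route := by
  intro question _
  show infer_route question = infer_route_alt question
  unfold infer_route infer_route_alt pvFlat
  set q := PySem.Str.strip (PySem.Str.lower question) with hq
  simp only [List.filter_append, List.map_append, pvPick, pv_contains_append,
    pv_contains_group]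
  simp [pvMatches]
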